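-- pv_equiv track=rewrite | github.com/Mao-o/cc-mp-worktools | plugins/sensitive-files-guard/hooks/redact-sensitive-reads/handlers/bash/operand_lexer.py | _find_path_candidates
-- ===== SOURCE A (Python) =====
-- def _find_path_candidates(tokens: list[str]) -> list[str]:
--     """第 1 トークン以降から、path 候補を抽出。
--
--     拾う形式:
--     - ``--`` より後ろは無条件で path 扱い
--     - 非 option トークン (``-`` で始まらない) はそのまま path 候補
--     - ``--opt=value`` / ``-o=value`` の ``=`` 以降 (RHS) を候補に追加
--     - 短形 option に value が **連結** した形 ``-X<value>`` (``-f.env`` 等) は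
--       ``tok[2:]`` を候補に追加
--     """
--     candidates: list[str] = []
--     in_ddash = False
--     for tok in tokens[1:]:
--         if tok == "--":
--             in_ddash = True
--             continue
--         if in_ddash:
--             candidates.append(tok)
--             continue
--         if tok.startswith("--"):
--             if "=" in tok:
--                 rhs = tok.split("=", 1)[1]
--                 if rhs:
--                     candidates.append(rhs)
--             continue
--         if tok.startswith("-"):
--             if "=" in tok:
--                 rhs = tok.split("=", 1)[1]
--                 if rhs:
--                     candidates.append(rhs)
--             elif len(tok) > 2:
--                 candidates.append(tok[2:])
--             continue
--         candidates.append(tok)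
--     return candidates
-- ===== SOURCE B (Python) =====
-- def _classify(tok: str):
--     """Classify a single pre-'--' token; return the path candidate or None."""
--     if not tok.startswith("-"):
--         return tok
--     if "=" in tok:
--         rhs = tok.split("=", 1)[1]
--         return rhs if rhs else None
--     if not tok.startswith("--") and len(tok) > 2:
--         return tok[2:]
--     return None
--
--
-- def _find_path_candidates(tokens: list[str]) -> list[str]:
--     tail = tokens[1:]
--     if "--" in tail:
--         i = tail.index("--")
--         pre = tail[:i]
--         suf = [t for t in tail[i + 1:] if t != "--"]
--     else:
--         pre, suf = tail, []
--     return [c for c in map(_classify, pre) if c is not None] + suf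
-- ===== Notes on version B (the rewrite author's own statement) =====
-- stated objective: alternative
-- what changed: Replaces the stateful in_ddash flag loop by a deterministic split at the first '--' marker: the prefix is classified by a pure per-token helper mapped/filtered over it, the suffix is appended with '--' tokens filtered out.
import Mathlib
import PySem

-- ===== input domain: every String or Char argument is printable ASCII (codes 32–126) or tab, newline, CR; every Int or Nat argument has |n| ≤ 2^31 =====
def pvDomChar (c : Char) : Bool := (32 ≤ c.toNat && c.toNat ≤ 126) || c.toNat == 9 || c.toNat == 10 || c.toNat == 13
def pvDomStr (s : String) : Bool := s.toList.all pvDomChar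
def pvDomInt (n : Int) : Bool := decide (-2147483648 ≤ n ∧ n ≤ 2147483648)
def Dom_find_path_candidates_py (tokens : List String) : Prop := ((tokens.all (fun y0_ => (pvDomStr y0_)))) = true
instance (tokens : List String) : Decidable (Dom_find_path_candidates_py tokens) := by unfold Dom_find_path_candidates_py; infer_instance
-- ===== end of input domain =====

-- B replaces A's stateful in_ddash flag by a split at the first "--" marker; alternative decomposition, same cost.

-- ===== PORT A =====
-- loop body of A's for-loop, state = (candidates, in_ddash)
def pvStepA (st : List String × Bool) (tok : String) : List String × Bool :=
  if tok = "--" then (st.1, true)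
  else if st.2 then (st.1 ++ [tok], st.2)
  else if PySem.Str.startswith tok "--" then
    (if PySem.Str.isIn "=" tok then
       let rhs := ((PySem.Str.splitMax? tok "=" 1).getD []).getD 1 ""
       if rhs ≠ "" then (st.1 ++ [rhs], st.2) else (st.1, st.2)
     else (st.1, st.2))
  else if PySem.Str.startswith tok "-" then
    (if PySem.Str.isIn "=" tok then
       let rhs := ((PySem.Str.splitMax? tok "=" 1).getD []).getD 1 ""
       if rhs ≠ "" then (st.1 ++ [rhs], st.2) else (st.1, st.2)
     else if 2 < PySem.Str.len tok then (st.1 ++ [PySem.Str.slice tok (some 2) none], st.2)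
     else (st.1, st.2))
  else (st.1 ++ [tok], st.2)

def find_path_candidates_py (tokens : List String) : List String :=
  ((PySem.List.slice tokens (some 1) none).foldl pvStepA ([], false)).1

-- ===== PORT B =====
-- B's helper _classify: a pre-marker token's candidate, or none
def pvClassify (tok : String) : Option String :=
  if ¬ PySem.Str.startswith tok "-" then some tok
  else if PySem.Str.isIn "=" tok then
    (let rhs := ((PySem.Str.splitMax? tok "=" 1).getD []).getD 1 ""
     if rhs ≠ "" then some rhs else none)
  else if ¬ PySem.Str.startswith tok "--" ∧ 2 < PySem.Str.len tok then
    some (PySem.Str.slice tok (some 2) none)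
  else none

def find_path_candidates_py_alt (tokens : List String) : List String :=
  let tail := PySem.List.slice tokens (some 1) none
  match PySem.List.index? tail "--" with
  | some i =>
      ((PySem.List.slice tail none (some (i : Int))).map pvClassify).filterMap id
        ++ (PySem.List.slice tail (some ((i : Int) + 1)) none).filter (fun t => t ≠ "--")
  | none => (tail.map pvClassify).filterMap id

-- ===== PRECONDITION & SPEC =====
def Spec_find_path_candidates_py (tokens : List String) (out : List String) : Prop := out = find_path_candidates_py_alt tokens
instance (tokens : List String) (out : List String) : Decidable (Spec_find_path_candidates_py tokens out) := by unfold Spec_find_path_candidates_py; infer_instance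

-- ===== CLAIM (what is proved, stated in full; the proofs are below) =====
def Claim_equal_find_path_candidates_py : Prop := ∀ (tokens : List String), Dom_find_path_candidates_py tokens → Spec_find_path_candidates_py tokens (find_path_candidates_py tokens)

-- ===== LEMMAS AND PROOFS =====

-- B's body as a function of the already-sliced tail
def pvBody (l : List String) : List String :=
  match PySem.List.index? l "--" with
  | some i => ((l.take i).map pvClassify).filterMap id ++ (l.drop (i + 1)).filter (fun t => t ≠ "--")
  | none => (l.map pvClassify).filterMap id

theorem pvSliceSucc {α : Type} (xs : List α) (i : Nat) :
    PySem.List.slice xs (some ((i : Int) + 1)) none = xs.drop (i + 1) := by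
  have h1 : ((i : Int) + 1) = ((i + 1 : Nat) : Int) := by push_cast; ring
  rw [h1, PySem.List.slice_from_natCast]

theorem pvAlt_eq_body (tokens : List String) :
    find_path_candidates_py_alt tokens = pvBody tokens.tail := by
  simp only [find_path_candidates_py_alt, pvBody, PySem.List.slice_from_one,
    PySem.List.slice_to_natCast, pvSliceSucc]

theorem pvStepA_ddash (l : List String) (acc : List String) :
    (l.foldl pvStepA (acc, true)).1 = acc ++ l.filter (fun t => t ≠ "--") := by
  induction l generalizing acc with
  | nil => simp
  | cons t l ih =>
      by_cases h : t = "--"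
      · subst h; simp [pvStepA, ih]
      · simp [pvStepA, h, ih]

theorem pvStepA_classify (tok : String) (h : tok ≠ "--") (acc : List String) :
    pvStepA (acc, false) tok = (acc ++ (pvClassify tok).toList, false) := by
  have hpref : PySem.Str.startswith tok "--" = true → PySem.Str.startswith tok "-" = true := by
    simp only [PySem.Str.startswith_eq]
    intro hp
    rw [PySem.Chars.startswith_iff] at hp ⊢
    exact List.IsPrefix.trans ⟨['-'], rfl⟩ hp
  unfold pvStepA pvClassify
  rw [if_neg h]
  by_cases hx : ((PySem.Str.splitMax? tok "=" 1).getD []).getD 1 "" = "" <;>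
    split_ifs <;> simp_all <;> omega

theorem pvMain (l : List String) (acc : List String) :
    (l.foldl pvStepA (acc, false)).1 = acc ++ pvBody l := by
  induction l generalizing acc with
  | nil => simp [pvBody]
  | cons t l ih =>
      by_cases h : t = "--"
      · subst h
        have : pvStepA (acc, false) "--" = (acc, true) := by simp [pvStepA]
        rw [List.foldl_cons, this, pvStepA_ddash]
        rw [pvBody]
        rw [PySem.List.index?_cons_self]
        simp
      · rw [List.foldl_cons, pvStepA_classify t h, ih]
        rw [pvBody, pvBody, PySem.List.index?_cons_of_ne l h]
        cases hi : PySem.List.index? l "--" with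
        | none => cases hc : pvClassify t <;> simp [hc]
        | some i => cases hc : pvClassify t <;> simp [hc]

-- ===== VERDICT (by name: the statement is the Claim_ definition above) =====
theorem find_path_candidates_py_spec : Claim_equal_find_path_candidates_py := by
  intro tokens _
  unfold Spec_find_path_candidates_py find_path_candidates_py
  rw [pvAlt_eq_body, PySem.List.slice_from_one]
  exact pvMain _ []
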